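-- pv_equiv track=rewrite | github.com/wyl116/genworker | src/common/logger.py | _convert_log_format
-- ===== SOURCE A (Python) =====
-- def _convert_log_format(format_str: str) -> str:
--     """Convert Java-style log format to Python logging format."""
--     if "{yyyy-MM-dd HH:mm:ss.SSS}" in format_str:
--         format_str = format_str.replace(
--             "{yyyy-MM-dd HH:mm:ss.SSS}", "%(asctime)s"
--         )
--     elif "{yyyy-MM-dd HH:mm:ss}" in format_str:
--         format_str = format_str.replace("{yyyy-MM-dd HH:mm:ss}", "%(asctime)s")
--
--     replacements = {
--         "%level": "%(levelname)s",
--         "%msg": "%(message)s",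
--         "%name": "%(name)s",
--         "%thread": "%(threadName)s",
--         "%logger": "%(name)s",
--         "%file": "%(filename)s",
--         "%path": "%(pathname)s",
--         "%relpath": "%(relpath)s",
--         "%line": "%(lineno)d",
--         "%func": "%(funcName)s",
--         "%n": "",
--     }
--
--     for old, new in replacements.items():
--         format_str = format_str.replace(old, new)
--
--     return format_str
-- ===== SOURCE B (Python) =====
-- def _convert_log_format(format_str: str) -> str:
--     """Convert Java-style log format to Python logging format."""
--     for pat in ("{yyyy-MM-dd HH:mm:ss.SSS}", "{yyyy-MM-dd HH:mm:ss}"):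
--         if pat in format_str:
--             format_str = format_str.replace(pat, "%(asctime)s")
--             break
--
--     replacements = {
--         "%level": "%(levelname)s",
--         "%msg": "%(message)s",
--         "%name": "%(name)s",
--         "%thread": "%(threadName)s",
--         "%logger": "%(name)s",
--         "%file": "%(filename)s",
--         "%path": "%(pathname)s",
--         "%relpath": "%(relpath)s",
--         "%line": "%(lineno)d",
--         "%func": "%(funcName)s",
--         "%n": "",
--     }
--
--     # single left-to-right pass, trying the longest pattern first at each position
--     items = sorted(replacements.items(), key=lambda kv: len(kv[0]), reverse=True)
--     out = []
--     i = 0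
--     n = len(format_str)
--     while i < n:
--         for old, new in items:
--             if format_str.startswith(old, i):
--                 out.append(new)
--                 i += len(old)
--                 break
--         else:
--             out.append(format_str[i])
--             i += 1
--     return "".join(out)
-- ===== Notes on version B (the rewrite author's own statement) =====
-- stated objective: alternative
-- what changed: Replaces the eleven sequential full-string str.replace passes by a single left-to-right scan that, at each position, tries the replacement table's keys longest-first and emits the replacement (or the character) once.
import Mathlib
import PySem

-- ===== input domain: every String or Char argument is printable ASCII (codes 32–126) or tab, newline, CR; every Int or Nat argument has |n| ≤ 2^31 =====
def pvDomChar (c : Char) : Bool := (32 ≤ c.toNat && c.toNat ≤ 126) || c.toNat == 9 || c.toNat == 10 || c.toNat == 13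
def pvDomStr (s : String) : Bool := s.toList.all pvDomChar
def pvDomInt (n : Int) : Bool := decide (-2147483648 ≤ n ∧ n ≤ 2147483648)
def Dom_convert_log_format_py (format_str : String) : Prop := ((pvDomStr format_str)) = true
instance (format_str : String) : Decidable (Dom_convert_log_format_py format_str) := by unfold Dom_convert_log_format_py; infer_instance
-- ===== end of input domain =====

-- B replaces A's eleven sequential full-string replace passes by one left-to-right scan
-- that tries the table's keys longest-first at each position (alternative, same cost).


-- ===== PORT A =====
-- the date if/elif block of A
def pvDateA (format_str : String) : String :=
  if PySem.Str.isIn "{yyyy-MM-dd HH:mm:ss.SSS}" format_str then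
    PySem.Str.replace format_str "{yyyy-MM-dd HH:mm:ss.SSS}" "%(asctime)s"
  else if PySem.Str.isIn "{yyyy-MM-dd HH:mm:ss}" format_str then
    PySem.Str.replace format_str "{yyyy-MM-dd HH:mm:ss}" "%(asctime)s"
  else format_str

-- the `replacements` dict, in insertion order
def pvReplacementsA : List (String × String) :=
  [("%level", "%(levelname)s"), ("%msg", "%(message)s"), ("%name", "%(name)s"),
   ("%thread", "%(threadName)s"), ("%logger", "%(name)s"), ("%file", "%(filename)s"),
   ("%path", "%(pathname)s"), ("%relpath", "%(relpath)s"), ("%line", "%(lineno)d"),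
   ("%func", "%(funcName)s"), ("%n", "")]

-- `for old, new in replacements.items(): format_str = format_str.replace(old, new)`
def convert_log_format_py (format_str : String) : String :=
  pvReplacementsA.foldl (fun s p => PySem.Str.replace s p.1 p.2) (pvDateA format_str)

-- ===== PORT B =====
-- B's date loop: replace the first date pattern found, then break
def pvDatePats : List String := ["{yyyy-MM-dd HH:mm:ss.SSS}", "{yyyy-MM-dd HH:mm:ss}"]

def pvDateB (format_str : String) : String :=
  match pvDatePats.find? (fun pat => PySem.Str.isIn pat format_str) with
  | some pat => PySem.Str.replace format_str pat "%(asctime)s"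
  | none => format_str

-- the same `replacements` dict
def pvReplacementsB : List (String × String) :=
  [("%level", "%(levelname)s"), ("%msg", "%(message)s"), ("%name", "%(name)s"),
   ("%thread", "%(threadName)s"), ("%logger", "%(name)s"), ("%file", "%(filename)s"),
   ("%path", "%(pathname)s"), ("%relpath", "%(relpath)s"), ("%line", "%(lineno)d"),
   ("%func", "%(funcName)s"), ("%n", "")]

-- items = sorted(replacements.items(), key=lambda kv: len(kv[0]), reverse=True)
def pvItemsB : List (String × String) :=
  PySem.List.sorted pvReplacementsB (fun kv => PySem.Str.len kv.1) true

def pvKeysB : List (List Char × List Char) :=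
  pvItemsB.map (fun p => (p.1.toList, p.2.toList))

-- the while loop over positions: `rem` is the remaining characters, `out` the pieces list
def pvScanGo : List Char → List (List Char) → List (List Char)
  | [], out => out
  | c :: t, out =>
    match pvKeysB.find? (fun kv => PySem.Chars.startswith (c :: t) kv.1) with
    | some kv => pvScanGo (t.drop (kv.1.length - 1)) (out ++ [kv.2])
    | none => pvScanGo t (out ++ [[c]])
termination_by rem _ => rem.length
decreasing_by
  · simp only [List.length_drop, List.length_cons]; omega
  · simp

-- return "".join(out)
def convert_log_format_py_alt (format_str : String) : String :=
  String.ofList (PySem.Chars.join [] (pvScanGo (pvDateB format_str).toList []))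

-- ===== PRECONDITION & SPEC =====
def Spec_convert_log_format_py (format_str : String) (out : String) : Prop := out = convert_log_format_py_alt format_str
instance (format_str : String) (out : String) : Decidable (Spec_convert_log_format_py format_str out) := by unfold Spec_convert_log_format_py; infer_instance

-- ===== CLAIM (what is proved, stated in full; the proofs are below) =====
def Claim_equal_convert_log_format_py : Prop := ∀ (format_str : String), Dom_convert_log_format_py format_str → Spec_convert_log_format_py format_str (convert_log_format_py format_str)

-- ===== LEMMAS AND PROOFS =====

-- simple-recursion model of Python's str.replace (for nonempty `old`)
def pvRepl (old new : List Char) : List Char → List Char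
  | [] => []
  | c :: t =>
    if old.isPrefixOf (c :: t) then new ++ pvRepl old new (t.drop (old.length - 1))
    else c :: pvRepl old new t
termination_by s => s.length
decreasing_by
  · simp only [List.length_drop, List.length_cons]; omega
  · simp

theorem pvRepl_go (old new : List Char) (hold : old ≠ []) :
    ∀ fuel l acc, l.length ≤ fuel →
      PySem.Chars.replace.go old new fuel l acc = acc.reverse ++ pvRepl old new l := by
  intro fuel
  induction fuel with
  | zero =>
    intro l acc hl
    have : l = [] := List.eq_nil_of_length_eq_zero (Nat.le_zero.mp hl)
    subst this
    simp [PySem.Chars.replace.go, pvRepl]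
  | succ n ih =>
    intro l acc hl
    match l with
    | [] => simp [PySem.Chars.replace.go, pvRepl]
    | c :: t =>
      rw [PySem.Chars.replace.go]
      by_cases hp : old.isPrefixOf (c :: t)
      · rw [if_pos hp]
        obtain ⟨o, os, rfl⟩ : ∃ o os, old = o :: os := by
          cases old with
          | nil => exact absurd rfl hold
          | cons o os => exact ⟨o, os, rfl⟩
        have hdrop : (c :: t).drop (o :: os).length = t.drop ((o :: os).length - 1) := by
          simp
        rw [hdrop, ih _ _ (by simp at hl ⊢; omega)]
        rw [pvRepl, if_pos hp]
        simp
      · rw [if_neg hp, ih _ _ (by simp at hl ⊢; omega)]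
        rw [pvRepl, if_neg hp]
        simp

theorem pvReplace_eq (s old new : List Char) (hold : old ≠ []) :
    PySem.Chars.replace s old new = pvRepl old new s := by
  rw [PySem.Chars.replace, if_neg (by simpa using hold)]
  simpa using pvRepl_go old new hold s.length s []

-- equations of pvRepl
theorem pvRepl_nil (old new : List Char) : pvRepl old new [] = [] := by rw [pvRepl]

theorem pvRepl_cons_not (old new : List Char) (c : Char) (t : List Char)
    (h : ¬ old <+: (c :: t)) :
    pvRepl old new (c :: t) = c :: pvRepl old new t := by
  rw [pvRepl, if_neg (by simpa [List.isPrefixOf_iff_prefix] using h)]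

theorem pvRepl_self_append (old new b : List Char) (hold : old ≠ []) :
    pvRepl old new (old ++ b) = new ++ pvRepl old new b := by
  obtain ⟨o, os, rfl⟩ : ∃ o os, old = o :: os := by
    cases old with
    | nil => exact absurd rfl hold
    | cons o os => exact ⟨o, os, rfl⟩
  rw [List.cons_append, pvRepl, if_pos (by simp [List.isPrefixOf_iff_prefix])]
  simp

-- a prefix of a ++ b is comparable with a
theorem pv_prefix_append_cases : ∀ (a k b : List Char), k <+: a ++ b → k <+: a ∨ a <+: k := by
  intro a
  induction a with
  | nil => intro k b _; right; exact List.nil_prefix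
  | cons c a' ih =>
    intro k b hk
    match k with
    | [] => left; exact List.nil_prefix
    | d :: k' =>
      rw [List.cons_append, List.cons_prefix_cons] at hk
      obtain ⟨rfl, hk'⟩ := hk
      rcases ih k' b hk' with h | h
      · left; exact List.cons_prefix_cons.mpr ⟨rfl, h⟩
      · right; exact List.cons_prefix_cons.mpr ⟨rfl, h⟩

theorem pv_not_prefix_append {k a : List Char} (b : List Char)
    (h1 : ¬ k <+: a) (h2 : ¬ a <+: k) : ¬ k <+: a ++ b := by
  intro h
  rcases pv_prefix_append_cases a k b h with h' | h'
  · exact h1 h'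
  · exact h2 h'

-- computable sufficient condition: no occurrence of `k` can start inside `a` (for any continuation)
def pvNoX (a k : List Char) : Bool :=
  a.tails.all (fun a₂ => a₂.isEmpty || (!(k.isPrefixOf a₂) && !(a₂.isPrefixOf k)))

theorem pvNoX_spec {a k : List Char} (h : pvNoX a k = true) :
    ∀ a₂ b, a₂ <:+ a → a₂ ≠ [] → ¬ k <+: a₂ ++ b := by
  intro a₂ b hsuf hne
  have := List.all_eq_true.mp h a₂ ((List.mem_tails _ _).mpr hsuf)
  simp only [List.isEmpty_iff, Bool.or_eq_true, Bool.and_eq_true, Bool.not_eq_true'] at this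
  rcases this with h' | ⟨h1, h2⟩
  · exact absurd h' hne
  · exact pv_not_prefix_append b
      (fun hx => by rw [List.isPrefixOf_iff_prefix.mpr hx] at h1; exact Bool.noConfusion h1)
      (fun hx => by rw [List.isPrefixOf_iff_prefix.mpr hx] at h2; exact Bool.noConfusion h2)

-- replace distributes over an append when no occurrence can start in the first part
theorem pvRepl_append (k v : List Char) :
    ∀ a b, (∀ a₂, a₂ <:+ a → a₂ ≠ [] → ¬ k <+: a₂ ++ b) →
      pvRepl k v (a ++ b) = a ++ pvRepl k v b := by
  intro a
  induction a with
  | nil => intro b _; simp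
  | cons c a' ih =>
    intro b h
    show pvRepl k v (c :: (a' ++ b)) = c :: (a' ++ pvRepl k v b)
    rw [pvRepl_cons_not k v c (a' ++ b)
        (by simpa using h (c :: a') (List.suffix_refl _) (by simp)),
      ih b (fun a₂ hs hne => h a₂ (hs.trans (List.suffix_cons _ _)) hne)]

theorem pvRepl_append_noX (k v a b : List Char) (h : pvNoX a k = true) :
    pvRepl k v (a ++ b) = a ++ pvRepl k v b :=
  pvRepl_append k v a b (fun a₂ hs hne => pvNoX_spec h a₂ b hs hne)

-- stability: replacing with a '%'-headed value cannot create a new '%'-free prefix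
theorem pvRepl_stable (k v : List Char) (hv : v.head? = some '%') :
    ∀ u w, w ≠ [] → (∀ a ∈ w, a ≠ '%') → ¬ w <+: u → ¬ w <+: pvRepl k v u := by
  intro u
  induction u with
  | nil => intro w hne _ _; rw [pvRepl_nil]; simpa using hne
  | cons c t ih =>
    intro w hne hw hu
    rw [pvRepl]
    split
    · -- prefix branch: result starts with v = '%' :: _
      obtain ⟨v', rfl⟩ : ∃ v', v = '%' :: v' := by
        cases v with
        | nil => simp at hv
        | cons a v' => simp at hv; exact ⟨v', by rw [hv]⟩
      intro hpre
      match w with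
      | [] => exact hne rfl
      | b :: w' =>
        rw [List.cons_append, List.cons_prefix_cons] at hpre
        exact hw b (by simp) hpre.1
    · intro hpre
      match w with
      | [] => exact hne rfl
      | b :: w' =>
        rw [List.cons_prefix_cons] at hpre
        obtain ⟨rfl, hw'⟩ := hpre
        match w' with
        | [] => exact hu (List.cons_prefix_cons.mpr ⟨rfl, List.nil_prefix⟩)
        | e :: w'' =>
          exact ih (e :: w'') (by simp) (fun a ha => hw a (by simp [ha]))
            (fun hh => hu (List.cons_prefix_cons.mpr ⟨rfl, hh⟩)) hw'

-- the replacement chain, on character lists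
def pvChain (P : List (List Char × List Char)) (s : List Char) : List Char :=
  P.foldl (fun s p => pvRepl p.1 p.2 s) s

-- shape conditions on a pair list: keys are '%' + nonempty '%'-free tail; values start '%'
def pvKeysOk (P : List (List Char × List Char)) : Bool :=
  P.all (fun p => p.1.head? == some '%' && decide (2 ≤ p.1.length) && p.1.tail.all (fun a => a != '%'))
def pvValsOk (P : List (List Char × List Char)) : Bool :=
  P.all (fun p => p.2.head? == some '%')

theorem pvChain_nil_pairs (s : List Char) : pvChain [] s = s := rfl

theorem pvChain_cons_pairs (p : List Char × List Char) (P : List (List Char × List Char))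
    (s : List Char) : pvChain (p :: P) s = pvChain P (pvRepl p.1 p.2 s) := rfl

theorem pvChain_append_pairs (P Q : List (List Char × List Char)) (s : List Char) :
    pvChain (P ++ Q) s = pvChain Q (pvChain P s) := by
  simp [pvChain, List.foldl_append]

-- distribution of a whole chain over an append (first part untouched, checked by pvNoX)
theorem pvChain_append_noX (a : List Char) :
    ∀ (P : List (List Char × List Char)) b, (P.all (fun p => pvNoX a p.1)) = true →
      pvChain P (a ++ b) = a ++ pvChain P b := by
  intro P
  induction P with
  | nil => intro b _; rfl
  | cons p P' ih =>
    intro b h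
    simp only [List.all_cons, Bool.and_eq_true] at h
    rw [pvChain_cons_pairs, pvRepl_append_noX _ _ _ _ h.1, ih _ h.2, pvChain_cons_pairs]

-- chain-level stability
theorem pvChain_stable (w : List Char) (hne : w ≠ []) (hw : ∀ a ∈ w, a ≠ '%') :
    ∀ (P : List (List Char × List Char)) u, pvValsOk P = true → ¬ w <+: u →
      ¬ w <+: pvChain P u := by
  intro P
  induction P with
  | nil => intro u _ h; exact h
  | cons p P' ih =>
    intro u hv h
    rw [pvValsOk, List.all_cons, Bool.and_eq_true] at hv
    have hv1 : p.2.head? = some '%' := by have := hv.1; simpa using this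
    rw [pvChain_cons_pairs]
    exact ih (pvRepl p.1 p.2 u) hv.2 (pvRepl_stable p.1 p.2 hv1 u w hne hw h)

-- peeling one character that no key matches at, c ≠ '%'
theorem pvChain_cons_ne (c : Char) (hc : c ≠ '%') :
    ∀ (P : List (List Char × List Char)) t, pvKeysOk P = true →
      pvChain P (c :: t) = c :: pvChain P t := by
  intro P
  induction P with
  | nil => intro t _; rfl
  | cons p P' ih =>
    intro t hk
    rw [pvKeysOk, List.all_cons, Bool.and_eq_true] at hk
    have hk2 : pvKeysOk P' = true := hk.2
    have hk1 := hk.1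
    have hnp : ¬ p.1 <+: (c :: t) := by
      intro hpre
      match hh : p.1 with
      | [] => rw [hh] at hk1; simp at hk1
      | a :: k' =>
        rw [hh] at hpre hk1
        rw [List.cons_prefix_cons] at hpre
        simp only [Bool.and_eq_true, beq_iff_eq, List.head?_cons, Option.some.injEq] at hk1
        exact hc (hpre.1 ▸ hk1.1.1 ▸ rfl)
    rw [pvChain_cons_pairs, pvRepl_cons_not _ _ _ _ hnp, ih (pvRepl p.1 p.2 t) hk2]
    rfl

-- peeling a '%' that starts no key occurrence
theorem pvChain_cons_pct :
    ∀ (P : List (List Char × List Char)) t, pvKeysOk P = true → pvValsOk P = true →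
      (∀ p ∈ P, ¬ p.1 <+: ('%' :: t)) →
      pvChain P ('%' :: t) = '%' :: pvChain P t := by
  intro P
  induction P with
  | nil => intro t _ _ _; rfl
  | cons p P' ih =>
    intro t hk hv h
    rw [pvKeysOk, List.all_cons, Bool.and_eq_true] at hk
    rw [pvValsOk, List.all_cons, Bool.and_eq_true] at hv
    have hk2 : pvKeysOk P' = true := hk.2
    have hv2 : pvValsOk P' = true := hv.2
    have hv1 : p.2.head? = some '%' := by have := hv.1; simpa using this
    rw [pvChain_cons_pairs, pvRepl_cons_not _ _ _ _ (h p (by simp))]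
    rw [ih (pvRepl p.1 p.2 t) hk2 hv2 ?later]
    · rfl
    intro q hq hpre
    match hh : q.1 with
    | [] =>
      have := List.all_eq_true.mp hk2 q hq
      rw [hh] at this
      simp at this
    | a :: k' =>
      have hkq := List.all_eq_true.mp hk2 q hq
      rw [hh] at hkq hpre
      simp only [Bool.and_eq_true, beq_iff_eq] at hkq
      rw [List.cons_prefix_cons] at hpre
      have ha : a = '%' := by simpa using hkq.1.1
      have hk'ne : k' ≠ [] := by
        have := hkq.1.2
        rw [decide_eq_true_iff] at this
        intro hx; rw [hx] at this; simp at this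
      have hk'w : ∀ b ∈ k', b ≠ '%' := by
        have := hkq.2
        simp only [List.tail_cons] at this
        intro b hb
        simpa using List.all_eq_true.mp this b hb
      have horig : ¬ k' <+: t := by
        intro hx
        exact h q (List.mem_cons_of_mem _ hq)
          (by rw [hh, List.cons_prefix_cons]; exact ⟨ha.symm ▸ rfl, hx⟩)
      exact pvRepl_stable p.1 p.2 hv1 t k' hk'ne hk'w horig hpre.2

-- ===== the two concrete stage lists (A order without the final ("%n", "") stage) =====
def pvP10 : List (List Char × List Char) :=
  [("%level".toList, "%(levelname)s".toList), ("%msg".toList, "%(message)s".toList),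
   ("%name".toList, "%(name)s".toList), ("%thread".toList, "%(threadName)s".toList),
   ("%logger".toList, "%(name)s".toList), ("%file".toList, "%(filename)s".toList),
   ("%path".toList, "%(pathname)s".toList), ("%relpath".toList, "%(relpath)s".toList),
   ("%line".toList, "%(lineno)d".toList), ("%func".toList, "%(funcName)s".toList)]

def pvKN : List Char := "%n".toList

-- the full A-side pipeline on lists
def pvAList (s : List Char) : List Char := pvRepl pvKN [] (pvChain pvP10 s)

-- the B-side scan as a plain function
def pvScanF (s : List Char) : List Char := (pvScanGo s []).flatten

-- accumulator lemma for pvScanGo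
theorem pvScanGo_out : ∀ n rem out, rem.length ≤ n → pvScanGo rem out = out ++ pvScanGo rem [] := by
  intro n
  induction n with
  | zero =>
    intro rem out h
    have : rem = [] := List.eq_nil_of_length_eq_zero (Nat.le_zero.mp h)
    subst this; simp [pvScanGo]
  | succ n ih =>
    intro rem out h
    match rem with
    | [] => simp [pvScanGo]
    | c :: t =>
      rw [pvScanGo, pvScanGo]
      cases hf : pvKeysB.find? (fun kv => PySem.Chars.startswith (c :: t) kv.1) with
      | some kv =>
        simp only
        rw [ih (t.drop (kv.1.length - 1)) (out ++ [kv.2]) (by simp at h ⊢; omega),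
          ih (t.drop (kv.1.length - 1)) ([] ++ [kv.2]) (by simp at h ⊢; omega)]
        simp
      | none =>
        simp only
        rw [ih t (out ++ [[c]]) (by simp at h ⊢; omega), ih t ([] ++ [[c]]) (by simp at h ⊢; omega)]
        simp

theorem pvScanF_nil : pvScanF [] = [] := by simp [pvScanF, pvScanGo]

theorem pvScanF_match (c : Char) (t : List Char) (kv : List Char × List Char)
    (hf : pvKeysB.find? (fun kv => PySem.Chars.startswith (c :: t) kv.1) = some kv) :
    pvScanF (c :: t) = kv.2 ++ pvScanF (t.drop (kv.1.length - 1)) := by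
  rw [pvScanF, pvScanGo, hf]
  simp only
  rw [pvScanGo_out (t.drop (kv.1.length - 1)).length _ _ le_rfl]
  simp [pvScanF]

theorem pvScanF_nomatch (c : Char) (t : List Char)
    (hf : pvKeysB.find? (fun kv => PySem.Chars.startswith (c :: t) kv.1) = none) :
    pvScanF (c :: t) = c :: pvScanF t := by
  rw [pvScanF, pvScanGo, hf]
  simp only
  rw [pvScanGo_out t.length _ _ le_rfl]
  simp [pvScanF]

-- the B key order, as a literal
theorem pvKeysB_eq : pvKeysB =
    [("%relpath".toList, "%(relpath)s".toList), ("%thread".toList, "%(threadName)s".toList),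
     ("%logger".toList, "%(name)s".toList), ("%level".toList, "%(levelname)s".toList),
     ("%name".toList, "%(name)s".toList), ("%file".toList, "%(filename)s".toList),
     ("%path".toList, "%(pathname)s".toList), ("%line".toList, "%(lineno)d".toList),
     ("%func".toList, "%(funcName)s".toList), ("%msg".toList, "%(message)s".toList),
     ("%n".toList, "".toList)] := by decide

-- boolean prefix bridges
theorem pvIsPrefixOf_true {k s : List Char} (h : k <+: s) : k.isPrefixOf s = true :=
  List.isPrefixOf_iff_prefix.mpr h

theorem pvIsPrefixOf_not {k s : List Char} (h : ¬ k <+: s) : ¬ k.isPrefixOf s = true :=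
  fun hx => h (List.isPrefixOf_iff_prefix.mp hx)

theorem pvChain_nil (P : List (List Char × List Char)) : pvChain P [] = [] := by
  induction P with
  | nil => rfl
  | cons p P ih => rw [pvChain_cons_pairs, pvRepl_nil, ih]

theorem pvA_level (b : List Char) :
    pvAList ("%level".toList ++ b) = "%(levelname)s".toList ++ pvAList b := by
  rw [pvAList, show pvP10 = [] ++ ("%level".toList, "%(levelname)s".toList) :: [("%msg".toList, "%(message)s".toList), ("%name".toList, "%(name)s".toList), ("%thread".toList, "%(threadName)s".toList), ("%logger".toList, "%(name)s".toList), ("%file".toList, "%(filename)s".toList), ("%path".toList, "%(pathname)s".toList), ("%relpath".toList, "%(relpath)s".toList), ("%line".toList, "%(lineno)d".toList), ("%func".toList, "%(funcName)s".toList)] from rfl]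
  rw [pvChain_append_pairs]
  rw [pvChain_append_noX _ _ _ (by decide)]
  rw [pvChain_cons_pairs]
  rw [pvRepl_self_append _ _ _ (by decide)]
  rw [pvChain_append_noX _ _ _ (by decide)]
  rw [pvRepl_append_noX _ _ _ _ (by decide)]
  rfl

theorem pvA_msg (b : List Char) :
    pvAList ("%msg".toList ++ b) = "%(message)s".toList ++ pvAList b := by
  rw [pvAList, show pvP10 = [("%level".toList, "%(levelname)s".toList)] ++ ("%msg".toList, "%(message)s".toList) :: [("%name".toList, "%(name)s".toList), ("%thread".toList, "%(threadName)s".toList), ("%logger".toList, "%(name)s".toList), ("%file".toList, "%(filename)s".toList), ("%path".toList, "%(pathname)s".toList), ("%relpath".toList, "%(relpath)s".toList), ("%line".toList, "%(lineno)d".toList), ("%func".toList, "%(funcName)s".toList)] from rfl]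
  rw [pvChain_append_pairs]
  rw [pvChain_append_noX _ _ _ (by decide)]
  rw [pvChain_cons_pairs]
  rw [pvRepl_self_append _ _ _ (by decide)]
  rw [pvChain_append_noX _ _ _ (by decide)]
  rw [pvRepl_append_noX _ _ _ _ (by decide)]
  rfl

theorem pvA_name (b : List Char) :
    pvAList ("%name".toList ++ b) = "%(name)s".toList ++ pvAList b := by
  rw [pvAList, show pvP10 = [("%level".toList, "%(levelname)s".toList), ("%msg".toList, "%(message)s".toList)] ++ ("%name".toList, "%(name)s".toList) :: [("%thread".toList, "%(threadName)s".toList), ("%logger".toList, "%(name)s".toList), ("%file".toList, "%(filename)s".toList), ("%path".toList, "%(pathname)s".toList), ("%relpath".toList, "%(relpath)s".toList), ("%line".toList, "%(lineno)d".toList), ("%func".toList, "%(funcName)s".toList)] from rfl]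
  rw [pvChain_append_pairs]
  rw [pvChain_append_noX _ _ _ (by decide)]
  rw [pvChain_cons_pairs]
  rw [pvRepl_self_append _ _ _ (by decide)]
  rw [pvChain_append_noX _ _ _ (by decide)]
  rw [pvRepl_append_noX _ _ _ _ (by decide)]
  rfl

theorem pvA_thread (b : List Char) :
    pvAList ("%thread".toList ++ b) = "%(threadName)s".toList ++ pvAList b := by
  rw [pvAList, show pvP10 = [("%level".toList, "%(levelname)s".toList), ("%msg".toList, "%(message)s".toList), ("%name".toList, "%(name)s".toList)] ++ ("%thread".toList, "%(threadName)s".toList) :: [("%logger".toList, "%(name)s".toList), ("%file".toList, "%(filename)s".toList), ("%path".toList, "%(pathname)s".toList), ("%relpath".toList, "%(relpath)s".toList), ("%line".toList, "%(lineno)d".toList), ("%func".toList, "%(funcName)s".toList)] from rfl]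
  rw [pvChain_append_pairs]
  rw [pvChain_append_noX _ _ _ (by decide)]
  rw [pvChain_cons_pairs]
  rw [pvRepl_self_append _ _ _ (by decide)]
  rw [pvChain_append_noX _ _ _ (by decide)]
  rw [pvRepl_append_noX _ _ _ _ (by decide)]
  rfl

theorem pvA_logger (b : List Char) :
    pvAList ("%logger".toList ++ b) = "%(name)s".toList ++ pvAList b := by
  rw [pvAList, show pvP10 = [("%level".toList, "%(levelname)s".toList), ("%msg".toList, "%(message)s".toList), ("%name".toList, "%(name)s".toList), ("%thread".toList, "%(threadName)s".toList)] ++ ("%logger".toList, "%(name)s".toList) :: [("%file".toList, "%(filename)s".toList), ("%path".toList, "%(pathname)s".toList), ("%relpath".toList, "%(relpath)s".toList), ("%line".toList, "%(lineno)d".toList), ("%func".toList, "%(funcName)s".toList)] from rfl]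
  rw [pvChain_append_pairs]
  rw [pvChain_append_noX _ _ _ (by decide)]
  rw [pvChain_cons_pairs]
  rw [pvRepl_self_append _ _ _ (by decide)]
  rw [pvChain_append_noX _ _ _ (by decide)]
  rw [pvRepl_append_noX _ _ _ _ (by decide)]
  rfl

theorem pvA_file (b : List Char) :
    pvAList ("%file".toList ++ b) = "%(filename)s".toList ++ pvAList b := by
  rw [pvAList, show pvP10 = [("%level".toList, "%(levelname)s".toList), ("%msg".toList, "%(message)s".toList), ("%name".toList, "%(name)s".toList), ("%thread".toList, "%(threadName)s".toList), ("%logger".toList, "%(name)s".toList)] ++ ("%file".toList, "%(filename)s".toList) :: [("%path".toList, "%(pathname)s".toList), ("%relpath".toList, "%(relpath)s".toList), ("%line".toList, "%(lineno)d".toList), ("%func".toList, "%(funcName)s".toList)] from rfl]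
  rw [pvChain_append_pairs]
  rw [pvChain_append_noX _ _ _ (by decide)]
  rw [pvChain_cons_pairs]
  rw [pvRepl_self_append _ _ _ (by decide)]
  rw [pvChain_append_noX _ _ _ (by decide)]
  rw [pvRepl_append_noX _ _ _ _ (by decide)]
  rfl

theorem pvA_path (b : List Char) :
    pvAList ("%path".toList ++ b) = "%(pathname)s".toList ++ pvAList b := by
  rw [pvAList, show pvP10 = [("%level".toList, "%(levelname)s".toList), ("%msg".toList, "%(message)s".toList), ("%name".toList, "%(name)s".toList), ("%thread".toList, "%(threadName)s".toList), ("%logger".toList, "%(name)s".toList), ("%file".toList, "%(filename)s".toList)] ++ ("%path".toList, "%(pathname)s".toList) :: [("%relpath".toList, "%(relpath)s".toList), ("%line".toList, "%(lineno)d".toList), ("%func".toList, "%(funcName)s".toList)] from rfl]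
  rw [pvChain_append_pairs]
  rw [pvChain_append_noX _ _ _ (by decide)]
  rw [pvChain_cons_pairs]
  rw [pvRepl_self_append _ _ _ (by decide)]
  rw [pvChain_append_noX _ _ _ (by decide)]
  rw [pvRepl_append_noX _ _ _ _ (by decide)]
  rfl

theorem pvA_relpath (b : List Char) :
    pvAList ("%relpath".toList ++ b) = "%(relpath)s".toList ++ pvAList b := by
  rw [pvAList, show pvP10 = [("%level".toList, "%(levelname)s".toList), ("%msg".toList, "%(message)s".toList), ("%name".toList, "%(name)s".toList), ("%thread".toList, "%(threadName)s".toList), ("%logger".toList, "%(name)s".toList), ("%file".toList, "%(filename)s".toList), ("%path".toList, "%(pathname)s".toList)] ++ ("%relpath".toList, "%(relpath)s".toList) :: [("%line".toList, "%(lineno)d".toList), ("%func".toList, "%(funcName)s".toList)] from rfl]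
  rw [pvChain_append_pairs]
  rw [pvChain_append_noX _ _ _ (by decide)]
  rw [pvChain_cons_pairs]
  rw [pvRepl_self_append _ _ _ (by decide)]
  rw [pvChain_append_noX _ _ _ (by decide)]
  rw [pvRepl_append_noX _ _ _ _ (by decide)]
  rfl

theorem pvA_line (b : List Char) :
    pvAList ("%line".toList ++ b) = "%(lineno)d".toList ++ pvAList b := by
  rw [pvAList, show pvP10 = [("%level".toList, "%(levelname)s".toList), ("%msg".toList, "%(message)s".toList), ("%name".toList, "%(name)s".toList), ("%thread".toList, "%(threadName)s".toList), ("%logger".toList, "%(name)s".toList), ("%file".toList, "%(filename)s".toList), ("%path".toList, "%(pathname)s".toList), ("%relpath".toList, "%(relpath)s".toList)] ++ ("%line".toList, "%(lineno)d".toList) :: [("%func".toList, "%(funcName)s".toList)] from rfl]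
  rw [pvChain_append_pairs]
  rw [pvChain_append_noX _ _ _ (by decide)]
  rw [pvChain_cons_pairs]
  rw [pvRepl_self_append _ _ _ (by decide)]
  rw [pvChain_append_noX _ _ _ (by decide)]
  rw [pvRepl_append_noX _ _ _ _ (by decide)]
  rfl

theorem pvA_func (b : List Char) :
    pvAList ("%func".toList ++ b) = "%(funcName)s".toList ++ pvAList b := by
  rw [pvAList, show pvP10 = [("%level".toList, "%(levelname)s".toList), ("%msg".toList, "%(message)s".toList), ("%name".toList, "%(name)s".toList), ("%thread".toList, "%(threadName)s".toList), ("%logger".toList, "%(name)s".toList), ("%file".toList, "%(filename)s".toList), ("%path".toList, "%(pathname)s".toList), ("%relpath".toList, "%(relpath)s".toList), ("%line".toList, "%(lineno)d".toList)] ++ ("%func".toList, "%(funcName)s".toList) :: [] from rfl]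
  rw [pvChain_append_pairs]
  rw [pvChain_append_noX _ _ _ (by decide)]
  rw [pvChain_cons_pairs]
  rw [pvRepl_self_append _ _ _ (by decide)]
  rw [pvChain_append_noX _ _ _ (by decide)]
  rw [pvRepl_append_noX _ _ _ _ (by decide)]
  rfl

set_option maxRecDepth 8192 in
theorem pvMain : ∀ n s, s.length ≤ n → pvAList s = pvScanF s := by
  intro n
  induction n with
  | zero =>
    intro s hlen
    have hs : s = [] := List.eq_nil_of_length_eq_zero (Nat.le_zero.mp hlen)
    subst hs
    rw [pvScanF_nil, pvAList, pvChain_nil, pvRepl_nil]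
  | succ n ih =>
    intro s hlen
    match s with
    | [] => rw [pvScanF_nil, pvAList, pvChain_nil, pvRepl_nil]
    | c :: t =>
      by_cases h1 : "%relpath".toList <+: (c :: t)
      · obtain ⟨r, hr⟩ := h1
        rw [show ("%relpath".toList : List Char) = '%' :: "relpath".toList from rfl, List.cons_append] at hr
        injection hr with hc0 ht0
        subst hc0
        subst ht0
        have hf : pvKeysB.find? (fun kv => PySem.Chars.startswith ('%' :: ("relpath".toList ++ r)) kv.1)
            = some ("%relpath".toList, "%(relpath)s".toList) := by
          rw [pvKeysB_eq]

          exact List.find?_cons_of_pos (pvIsPrefixOf_true ⟨r, rfl⟩)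
        rw [pvScanF_match _ _ _ hf]
        have hdrop : ("relpath".toList ++ r).drop ("%relpath".toList.length - 1) = r := by
          rw [show ("%relpath".toList.length - 1) = "relpath".toList.length from rfl]
          exact List.drop_left
        rw [hdrop]
        show pvAList ("%relpath".toList ++ r) = "%(relpath)s".toList ++ pvScanF r
        rw [pvA_relpath]
        have hr' : r.length ≤ n := by
          simp only [List.length_cons, List.length_append] at hlen
          omega
        rw [ih r hr']
      by_cases h2 : "%thread".toList <+: (c :: t)
      · obtain ⟨r, hr⟩ := h2
        rw [show ("%thread".toList : List Char) = '%' :: "thread".toList from rfl, List.cons_append] at hr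
        injection hr with hc0 ht0
        subst hc0
        subst ht0
        have hf : pvKeysB.find? (fun kv => PySem.Chars.startswith ('%' :: ("thread".toList ++ r)) kv.1)
            = some ("%thread".toList, "%(threadName)s".toList) := by
          rw [pvKeysB_eq]
          rw [List.find?_cons_of_neg (by exact pvIsPrefixOf_not h1)]
          exact List.find?_cons_of_pos (pvIsPrefixOf_true ⟨r, rfl⟩)
        rw [pvScanF_match _ _ _ hf]
        have hdrop : ("thread".toList ++ r).drop ("%thread".toList.length - 1) = r := by
          rw [show ("%thread".toList.length - 1) = "thread".toList.length from rfl]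
          exact List.drop_left
        rw [hdrop]
        show pvAList ("%thread".toList ++ r) = "%(threadName)s".toList ++ pvScanF r
        rw [pvA_thread]
        have hr' : r.length ≤ n := by
          simp only [List.length_cons, List.length_append] at hlen
          omega
        rw [ih r hr']
      by_cases h3 : "%logger".toList <+: (c :: t)
      · obtain ⟨r, hr⟩ := h3
        rw [show ("%logger".toList : List Char) = '%' :: "logger".toList from rfl, List.cons_append] at hr
        injection hr with hc0 ht0
        subst hc0
        subst ht0
        have hf : pvKeysB.find? (fun kv => PySem.Chars.startswith ('%' :: ("logger".toList ++ r)) kv.1)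
            = some ("%logger".toList, "%(name)s".toList) := by
          rw [pvKeysB_eq]
          rw [List.find?_cons_of_neg (by exact pvIsPrefixOf_not h1)]
          rw [List.find?_cons_of_neg (by exact pvIsPrefixOf_not h2)]
          exact List.find?_cons_of_pos (pvIsPrefixOf_true ⟨r, rfl⟩)
        rw [pvScanF_match _ _ _ hf]
        have hdrop : ("logger".toList ++ r).drop ("%logger".toList.length - 1) = r := by
          rw [show ("%logger".toList.length - 1) = "logger".toList.length from rfl]
          exact List.drop_left
        rw [hdrop]
        show pvAList ("%logger".toList ++ r) = "%(name)s".toList ++ pvScanF r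
        rw [pvA_logger]
        have hr' : r.length ≤ n := by
          simp only [List.length_cons, List.length_append] at hlen
          omega
        rw [ih r hr']
      by_cases h4 : "%level".toList <+: (c :: t)
      · obtain ⟨r, hr⟩ := h4
        rw [show ("%level".toList : List Char) = '%' :: "level".toList from rfl, List.cons_append] at hr
        injection hr with hc0 ht0
        subst hc0
        subst ht0
        have hf : pvKeysB.find? (fun kv => PySem.Chars.startswith ('%' :: ("level".toList ++ r)) kv.1)
            = some ("%level".toList, "%(levelname)s".toList) := by
          rw [pvKeysB_eq]
          rw [List.find?_cons_of_neg (by exact pvIsPrefixOf_not h1)]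
          rw [List.find?_cons_of_neg (by exact pvIsPrefixOf_not h2)]
          rw [List.find?_cons_of_neg (by exact pvIsPrefixOf_not h3)]
          exact List.find?_cons_of_pos (pvIsPrefixOf_true ⟨r, rfl⟩)
        rw [pvScanF_match _ _ _ hf]
        have hdrop : ("level".toList ++ r).drop ("%level".toList.length - 1) = r := by
          rw [show ("%level".toList.length - 1) = "level".toList.length from rfl]
          exact List.drop_left
        rw [hdrop]
        show pvAList ("%level".toList ++ r) = "%(levelname)s".toList ++ pvScanF r
        rw [pvA_level]
        have hr' : r.length ≤ n := by
          simp only [List.length_cons, List.length_append] at hlen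
          omega
        rw [ih r hr']
      by_cases h5 : "%name".toList <+: (c :: t)
      · obtain ⟨r, hr⟩ := h5
        rw [show ("%name".toList : List Char) = '%' :: "name".toList from rfl, List.cons_append] at hr
        injection hr with hc0 ht0
        subst hc0
        subst ht0
        have hf : pvKeysB.find? (fun kv => PySem.Chars.startswith ('%' :: ("name".toList ++ r)) kv.1)
            = some ("%name".toList, "%(name)s".toList) := by
          rw [pvKeysB_eq]
          rw [List.find?_cons_of_neg (by exact pvIsPrefixOf_not h1)]
          rw [List.find?_cons_of_neg (by exact pvIsPrefixOf_not h2)]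
          rw [List.find?_cons_of_neg (by exact pvIsPrefixOf_not h3)]
          rw [List.find?_cons_of_neg (by exact pvIsPrefixOf_not h4)]
          exact List.find?_cons_of_pos (pvIsPrefixOf_true ⟨r, rfl⟩)
        rw [pvScanF_match _ _ _ hf]
        have hdrop : ("name".toList ++ r).drop ("%name".toList.length - 1) = r := by
          rw [show ("%name".toList.length - 1) = "name".toList.length from rfl]
          exact List.drop_left
        rw [hdrop]
        show pvAList ("%name".toList ++ r) = "%(name)s".toList ++ pvScanF r
        rw [pvA_name]
        have hr' : r.length ≤ n := by
          simp only [List.length_cons, List.length_append] at hlen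
          omega
        rw [ih r hr']
      by_cases h6 : "%file".toList <+: (c :: t)
      · obtain ⟨r, hr⟩ := h6
        rw [show ("%file".toList : List Char) = '%' :: "file".toList from rfl, List.cons_append] at hr
        injection hr with hc0 ht0
        subst hc0
        subst ht0
        have hf : pvKeysB.find? (fun kv => PySem.Chars.startswith ('%' :: ("file".toList ++ r)) kv.1)
            = some ("%file".toList, "%(filename)s".toList) := by
          rw [pvKeysB_eq]
          rw [List.find?_cons_of_neg (by exact pvIsPrefixOf_not h1)]
          rw [List.find?_cons_of_neg (by exact pvIsPrefixOf_not h2)]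
          rw [List.find?_cons_of_neg (by exact pvIsPrefixOf_not h3)]
          rw [List.find?_cons_of_neg (by exact pvIsPrefixOf_not h4)]
          rw [List.find?_cons_of_neg (by exact pvIsPrefixOf_not h5)]
          exact List.find?_cons_of_pos (pvIsPrefixOf_true ⟨r, rfl⟩)
        rw [pvScanF_match _ _ _ hf]
        have hdrop : ("file".toList ++ r).drop ("%file".toList.length - 1) = r := by
          rw [show ("%file".toList.length - 1) = "file".toList.length from rfl]
          exact List.drop_left
        rw [hdrop]
        show pvAList ("%file".toList ++ r) = "%(filename)s".toList ++ pvScanF r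
        rw [pvA_file]
        have hr' : r.length ≤ n := by
          simp only [List.length_cons, List.length_append] at hlen
          omega
        rw [ih r hr']
      by_cases h7 : "%path".toList <+: (c :: t)
      · obtain ⟨r, hr⟩ := h7
        rw [show ("%path".toList : List Char) = '%' :: "path".toList from rfl, List.cons_append] at hr
        injection hr with hc0 ht0
        subst hc0
        subst ht0
        have hf : pvKeysB.find? (fun kv => PySem.Chars.startswith ('%' :: ("path".toList ++ r)) kv.1)
            = some ("%path".toList, "%(pathname)s".toList) := by
          rw [pvKeysB_eq]
          rw [List.find?_cons_of_neg (by exact pvIsPrefixOf_not h1)]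
          rw [List.find?_cons_of_neg (by exact pvIsPrefixOf_not h2)]
          rw [List.find?_cons_of_neg (by exact pvIsPrefixOf_not h3)]
          rw [List.find?_cons_of_neg (by exact pvIsPrefixOf_not h4)]
          rw [List.find?_cons_of_neg (by exact pvIsPrefixOf_not h5)]
          rw [List.find?_cons_of_neg (by exact pvIsPrefixOf_not h6)]
          exact List.find?_cons_of_pos (pvIsPrefixOf_true ⟨r, rfl⟩)
        rw [pvScanF_match _ _ _ hf]
        have hdrop : ("path".toList ++ r).drop ("%path".toList.length - 1) = r := by
          rw [show ("%path".toList.length - 1) = "path".toList.length from rfl]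
          exact List.drop_left
        rw [hdrop]
        show pvAList ("%path".toList ++ r) = "%(pathname)s".toList ++ pvScanF r
        rw [pvA_path]
        have hr' : r.length ≤ n := by
          simp only [List.length_cons, List.length_append] at hlen
          omega
        rw [ih r hr']
      by_cases h8 : "%line".toList <+: (c :: t)
      · obtain ⟨r, hr⟩ := h8
        rw [show ("%line".toList : List Char) = '%' :: "line".toList from rfl, List.cons_append] at hr
        injection hr with hc0 ht0
        subst hc0
        subst ht0
        have hf : pvKeysB.find? (fun kv => PySem.Chars.startswith ('%' :: ("line".toList ++ r)) kv.1)
            = some ("%line".toList, "%(lineno)d".toList) := by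
          rw [pvKeysB_eq]
          rw [List.find?_cons_of_neg (by exact pvIsPrefixOf_not h1)]
          rw [List.find?_cons_of_neg (by exact pvIsPrefixOf_not h2)]
          rw [List.find?_cons_of_neg (by exact pvIsPrefixOf_not h3)]
          rw [List.find?_cons_of_neg (by exact pvIsPrefixOf_not h4)]
          rw [List.find?_cons_of_neg (by exact pvIsPrefixOf_not h5)]
          rw [List.find?_cons_of_neg (by exact pvIsPrefixOf_not h6)]
          rw [List.find?_cons_of_neg (by exact pvIsPrefixOf_not h7)]
          exact List.find?_cons_of_pos (pvIsPrefixOf_true ⟨r, rfl⟩)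
        rw [pvScanF_match _ _ _ hf]
        have hdrop : ("line".toList ++ r).drop ("%line".toList.length - 1) = r := by
          rw [show ("%line".toList.length - 1) = "line".toList.length from rfl]
          exact List.drop_left
        rw [hdrop]
        show pvAList ("%line".toList ++ r) = "%(lineno)d".toList ++ pvScanF r
        rw [pvA_line]
        have hr' : r.length ≤ n := by
          simp only [List.length_cons, List.length_append] at hlen
          omega
        rw [ih r hr']
      by_cases h9 : "%func".toList <+: (c :: t)
      · obtain ⟨r, hr⟩ := h9
        rw [show ("%func".toList : List Char) = '%' :: "func".toList from rfl, List.cons_append] at hr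
        injection hr with hc0 ht0
        subst hc0
        subst ht0
        have hf : pvKeysB.find? (fun kv => PySem.Chars.startswith ('%' :: ("func".toList ++ r)) kv.1)
            = some ("%func".toList, "%(funcName)s".toList) := by
          rw [pvKeysB_eq]
          rw [List.find?_cons_of_neg (by exact pvIsPrefixOf_not h1)]
          rw [List.find?_cons_of_neg (by exact pvIsPrefixOf_not h2)]
          rw [List.find?_cons_of_neg (by exact pvIsPrefixOf_not h3)]
          rw [List.find?_cons_of_neg (by exact pvIsPrefixOf_not h4)]
          rw [List.find?_cons_of_neg (by exact pvIsPrefixOf_not h5)]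
          rw [List.find?_cons_of_neg (by exact pvIsPrefixOf_not h6)]
          rw [List.find?_cons_of_neg (by exact pvIsPrefixOf_not h7)]
          rw [List.find?_cons_of_neg (by exact pvIsPrefixOf_not h8)]
          exact List.find?_cons_of_pos (pvIsPrefixOf_true ⟨r, rfl⟩)
        rw [pvScanF_match _ _ _ hf]
        have hdrop : ("func".toList ++ r).drop ("%func".toList.length - 1) = r := by
          rw [show ("%func".toList.length - 1) = "func".toList.length from rfl]
          exact List.drop_left
        rw [hdrop]
        show pvAList ("%func".toList ++ r) = "%(funcName)s".toList ++ pvScanF r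
        rw [pvA_func]
        have hr' : r.length ≤ n := by
          simp only [List.length_cons, List.length_append] at hlen
          omega
        rw [ih r hr']
      by_cases h10 : "%msg".toList <+: (c :: t)
      · obtain ⟨r, hr⟩ := h10
        rw [show ("%msg".toList : List Char) = '%' :: "msg".toList from rfl, List.cons_append] at hr
        injection hr with hc0 ht0
        subst hc0
        subst ht0
        have hf : pvKeysB.find? (fun kv => PySem.Chars.startswith ('%' :: ("msg".toList ++ r)) kv.1)
            = some ("%msg".toList, "%(message)s".toList) := by
          rw [pvKeysB_eq]
          rw [List.find?_cons_of_neg (by exact pvIsPrefixOf_not h1)]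
          rw [List.find?_cons_of_neg (by exact pvIsPrefixOf_not h2)]
          rw [List.find?_cons_of_neg (by exact pvIsPrefixOf_not h3)]
          rw [List.find?_cons_of_neg (by exact pvIsPrefixOf_not h4)]
          rw [List.find?_cons_of_neg (by exact pvIsPrefixOf_not h5)]
          rw [List.find?_cons_of_neg (by exact pvIsPrefixOf_not h6)]
          rw [List.find?_cons_of_neg (by exact pvIsPrefixOf_not h7)]
          rw [List.find?_cons_of_neg (by exact pvIsPrefixOf_not h8)]
          rw [List.find?_cons_of_neg (by exact pvIsPrefixOf_not h9)]
          exact List.find?_cons_of_pos (pvIsPrefixOf_true ⟨r, rfl⟩)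
        rw [pvScanF_match _ _ _ hf]
        have hdrop : ("msg".toList ++ r).drop ("%msg".toList.length - 1) = r := by
          rw [show ("%msg".toList.length - 1) = "msg".toList.length from rfl]
          exact List.drop_left
        rw [hdrop]
        show pvAList ("%msg".toList ++ r) = "%(message)s".toList ++ pvScanF r
        rw [pvA_msg]
        have hr' : r.length ≤ n := by
          simp only [List.length_cons, List.length_append] at hlen
          omega
        rw [ih r hr']
      by_cases h11 : "%n".toList <+: (c :: t)
      · obtain ⟨r, hr⟩ := h11
        rw [show ("%n".toList ++ r : List Char) = '%' :: 'n' :: r from rfl] at hr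
        injection hr with hc0 ht0
        subst hc0
        subst ht0
        have hf : pvKeysB.find? (fun kv => PySem.Chars.startswith ('%' :: 'n' :: r) kv.1)
            = some ("%n".toList, "".toList) := by
          rw [pvKeysB_eq]
          rw [List.find?_cons_of_neg (by exact pvIsPrefixOf_not h1)]
          rw [List.find?_cons_of_neg (by exact pvIsPrefixOf_not h2)]
          rw [List.find?_cons_of_neg (by exact pvIsPrefixOf_not h3)]
          rw [List.find?_cons_of_neg (by exact pvIsPrefixOf_not h4)]
          rw [List.find?_cons_of_neg (by exact pvIsPrefixOf_not h5)]
          rw [List.find?_cons_of_neg (by exact pvIsPrefixOf_not h6)]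
          rw [List.find?_cons_of_neg (by exact pvIsPrefixOf_not h7)]
          rw [List.find?_cons_of_neg (by exact pvIsPrefixOf_not h8)]
          rw [List.find?_cons_of_neg (by exact pvIsPrefixOf_not h9)]
          rw [List.find?_cons_of_neg (by exact pvIsPrefixOf_not h10)]
          exact List.find?_cons_of_pos (pvIsPrefixOf_true ⟨r, rfl⟩)
        rw [pvScanF_match _ _ _ hf]
        rw [show (('n' :: r).drop ("%n".toList.length - 1)) = r from rfl]
        have hall : ∀ p ∈ pvP10, ¬ p.1 <+: ('%' :: 'n' :: r) := by
          intro p hp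
          simp only [pvP10, List.mem_cons, List.not_mem_nil, or_false] at hp
          rcases hp with rfl|rfl|rfl|rfl|rfl|rfl|rfl|rfl|rfl|rfl
          · exact h4
          · exact h10
          · exact h5
          · exact h2
          · exact h3
          · exact h6
          · exact h7
          · exact h1
          · exact h8
          · exact h9
        rw [pvAList, pvChain_cons_pct pvP10 ('n' :: r) (by decide) (by decide) hall]
        rw [pvChain_cons_ne 'n' (by simp) pvP10 r (by decide)]
        rw [show ('%' :: 'n' :: pvChain pvP10 r) = pvKN ++ pvChain pvP10 r from rfl]
        rw [pvRepl_self_append _ _ _ (by decide)]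
        show pvAList r = "".toList ++ pvScanF r
        rw [ih r (by simp only [List.length_cons] at hlen; omega)]
        rfl
      have hf : pvKeysB.find? (fun kv => PySem.Chars.startswith (c :: t) kv.1) = none := by
        rw [pvKeysB_eq]
        rw [List.find?_cons_of_neg (by exact pvIsPrefixOf_not h1)]
        rw [List.find?_cons_of_neg (by exact pvIsPrefixOf_not h2)]
        rw [List.find?_cons_of_neg (by exact pvIsPrefixOf_not h3)]
        rw [List.find?_cons_of_neg (by exact pvIsPrefixOf_not h4)]
        rw [List.find?_cons_of_neg (by exact pvIsPrefixOf_not h5)]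
        rw [List.find?_cons_of_neg (by exact pvIsPrefixOf_not h6)]
        rw [List.find?_cons_of_neg (by exact pvIsPrefixOf_not h7)]
        rw [List.find?_cons_of_neg (by exact pvIsPrefixOf_not h8)]
        rw [List.find?_cons_of_neg (by exact pvIsPrefixOf_not h9)]
        rw [List.find?_cons_of_neg (by exact pvIsPrefixOf_not h10)]
        rw [List.find?_cons_of_neg (by exact pvIsPrefixOf_not h11)]
        rfl
      rw [pvScanF_nomatch _ _ hf]
      have hlen' : t.length ≤ n := by
        simp only [List.length_cons] at hlen
        omega
      by_cases hc : c = '%'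
      · subst hc
        have hall : ∀ p ∈ pvP10, ¬ p.1 <+: ('%' :: t) := by
          intro p hp
          simp only [pvP10, List.mem_cons, List.not_mem_nil, or_false] at hp
          rcases hp with rfl|rfl|rfl|rfl|rfl|rfl|rfl|rfl|rfl|rfl
          · exact h4
          · exact h10
          · exact h5
          · exact h2
          · exact h3
          · exact h6
          · exact h7
          · exact h1
          · exact h8
          · exact h9
        rw [pvAList, pvChain_cons_pct pvP10 t (by decide) (by decide) hall]
        have hn : ¬ pvKN <+: ('%' :: pvChain pvP10 t) := by
          have hnt : ¬ ['n'] <+: t := by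
            intro hx
            exact h11 (List.cons_prefix_cons.mpr ⟨rfl, hx⟩)
          have hst := pvChain_stable ['n'] (by simp) (by simp) pvP10 t (by decide) hnt
          intro hx
          exact hst (List.cons_prefix_cons.mp hx).2
        rw [pvRepl_cons_not _ _ _ _ hn]
        show '%' :: pvAList t = '%' :: pvScanF t
        rw [ih t hlen']
      · rw [pvAList, pvChain_cons_ne c hc pvP10 t (by decide)]
        have hn : ¬ pvKN <+: (c :: pvChain pvP10 t) := by
          intro hx
          exact hc (List.cons_prefix_cons.mp hx).1.symm
        rw [pvRepl_cons_not _ _ _ _ hn]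
        show c :: pvAList t = c :: pvScanF t
        rw [ih t hlen']

-- "".join on character-list pieces is flatten
theorem pvJoinNil (parts : List (List Char)) : PySem.Chars.join [] parts = parts.flatten := by
  induction parts with
  | nil => rfl
  | cons p parts ih =>
    cases parts with
    | nil => simp [PySem.Chars.join, List.intercalate]
    | cons q parts' =>
      rw [PySem.Chars.join_cons_cons, ih]
      simp

theorem pvStrChain : ∀ (ps : List (String × String)) (s : String),
    ps.all (fun p => !(p.1.toList.isEmpty)) = true →
    ps.foldl (fun s p => PySem.Str.replace s p.1 p.2) s
      = String.ofList (pvChain (ps.map (fun p => (p.1.toList, p.2.toList))) s.toList) := by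
  intro ps
  induction ps with
  | nil =>
    intro s _
    rw [List.foldl_nil, List.map_nil, pvChain_nil_pairs, String.ofList_toList]
  | cons p ps ih =>
    intro s h
    simp only [List.all_cons, Bool.and_eq_true] at h
    rw [List.foldl_cons, ih _ h.2, List.map_cons, pvChain_cons_pairs]
    congr 1
    rw [PySem.Str.toList_replace]
    rw [pvReplace_eq _ _ _ (by
      have := h.1
      simp only [Bool.not_eq_true', List.isEmpty_eq_false_iff] at this
      exact this)]

-- B's date loop computes exactly A's if/elif date block
theorem pvDateB_eq (s : String) : pvDateB s = pvDateA s := by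
  rw [pvDateB, pvDateA, pvDatePats]
  by_cases h1 : PySem.Str.isIn "{yyyy-MM-dd HH:mm:ss.SSS}" s = true
  · rw [List.find?_cons_of_pos (by exact h1), if_pos h1]
  · rw [List.find?_cons_of_neg (by exact h1), if_neg h1]
    by_cases h2 : PySem.Str.isIn "{yyyy-MM-dd HH:mm:ss}" s = true
    · rw [List.find?_cons_of_pos (by exact h2), if_pos h2]
    · rw [List.find?_cons_of_neg (by exact h2), if_neg h2, List.find?_nil]

-- ===== VERDICT (by name: the statement is the Claim_ definition above) =====
theorem convert_log_format_py_spec : Claim_equal_convert_log_format_py := by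
  intro s _
  unfold Spec_convert_log_format_py convert_log_format_py convert_log_format_py_alt
  rw [pvStrChain pvReplacementsA (pvDateA s) (by decide)]
  rw [pvDateB_eq]
  rw [pvJoinNil]
  congr 1
  rw [show (pvReplacementsA.map (fun p => (p.1.toList, p.2.toList)))
      = pvP10 ++ [(pvKN, ([] : List Char))] from rfl]
  rw [pvChain_append_pairs]
  exact pvMain (pvDateA s).toList.length _ le_rfl
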